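-- pv_equiv track=rewrite | github.com/Adarshb2000/coding | SHROUTE.py | two_contracted
-- ===== SOURCE A (Python) =====
-- def two_contracted(numbers: list):
--     answer = [-1] * (len(numbers) + 1)
--     curr = -1
--     for index in range(len(numbers) - 1, -1, -1):
--         if numbers[index] == 2:
--             curr = index + 1
--
--         answer[index + 1] = curr
--
--     return answer
-- ===== SOURCE B (Python) =====
-- def two_contracted(numbers: list):
--     n = len(numbers)
--     answer = [-1] * (n + 1)
--     prev = 0
--     for p in range(n):
--         if numbers[p] == 2:
--             for idx in range(prev, p + 1):
--                 answer[idx + 1] = p + 1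
--             prev = p + 1
--     return answer
-- ===== Notes on version B (the rewrite author's own statement) =====
-- stated objective: alternative
-- what changed: Replaced the backward pass carrying a running 'next 2' pointer by a forward pass that, on each occurrence of 2, range-fills all not-yet-answered slots at once and advances a start marker.
import Mathlib
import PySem

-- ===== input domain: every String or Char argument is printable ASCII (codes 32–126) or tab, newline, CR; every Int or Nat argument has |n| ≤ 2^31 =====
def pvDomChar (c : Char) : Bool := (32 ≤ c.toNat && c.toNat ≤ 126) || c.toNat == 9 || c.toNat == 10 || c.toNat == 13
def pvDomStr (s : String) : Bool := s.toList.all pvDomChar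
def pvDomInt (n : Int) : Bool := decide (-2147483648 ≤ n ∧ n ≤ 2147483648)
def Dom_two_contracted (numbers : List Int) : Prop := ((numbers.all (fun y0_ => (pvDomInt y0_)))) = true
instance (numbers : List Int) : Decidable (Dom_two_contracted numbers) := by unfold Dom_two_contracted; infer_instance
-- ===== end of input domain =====

-- B replaces A's backward pass with a running pointer by a forward pass that range-fills the
-- pending answer slots each time a 2 is met (objective: alternative decomposition, same O(n) cost).

-- ===== PORT A =====
-- 'numbers[index]' is always in range here, so pyGetD is exact; 'index + 1 ≥ 0', so .toNat is exact.
def two_contracted (numbers : List Int) : List Int :=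
  let answer := List.replicate (numbers.length + 1) (-1 : Int)
  ((PySem.List.pyRange ((numbers.length : Int) - 1) (-1) (-1)).foldl
    (fun (st : List Int × Int) index =>
      let curr := if PySem.List.pyGetD numbers index 0 = 2 then index + 1 else st.2
      (st.1.set (index + 1).toNat curr, curr))
    (answer, -1)).1

-- ===== PORT B =====
-- 'numbers[p]' is always in range here, so pyGetD is exact; 'idx + 1 ≥ 0', so .toNat is exact.
def two_contracted_alt (numbers : List Int) : List Int :=
  let n : Int := numbers.length
  let answer := List.replicate (numbers.length + 1) (-1 : Int)
  ((PySem.List.pyRange 0 n 1).foldl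
    (fun (st : List Int × Int) p =>
      if PySem.List.pyGetD numbers p 0 = 2 then
        ((PySem.List.pyRange st.2 (p + 1) 1).foldl
          (fun a idx => a.set (idx + 1).toNat (p + 1)) st.1, p + 1)
      else st)
    (answer, 0)).1

-- ===== PRECONDITION & SPEC =====
def Spec_two_contracted (numbers : List Int) (out : List Int) : Prop := out = two_contracted_alt numbers
instance (numbers : List Int) (out : List Int) : Decidable (Spec_two_contracted numbers out) := by unfold Spec_two_contracted; infer_instance

-- ===== CLAIM (what is proved, stated in full; the proofs are below) =====
def Claim_equal_two_contracted : Prop := ∀ (numbers : List Int), Dom_two_contracted numbers → Spec_two_contracted numbers (two_contracted numbers)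

-- ===== LEMMAS AND PROOFS =====

-- Common model: (pvNext xs i c)[k] = 1 + the first index ≥ i+k (absolute) holding a 2,
-- with carry c when no 2 occurs at or after that position.
def pvNext : List Int → Int → Int → List Int
  | [], _, _ => []
  | x :: xs, i, c => (if x = 2 then i + 1 else (pvNext xs (i + 1) c).headD c) :: pvNext xs (i + 1) c

theorem pvHeadD_append_singleton (l : List Int) (a b : Int) : (l ++ [a]).headD b = l.headD a := by
  cases l <;> simp

theorem pvNext_snoc (ys : List Int) (z : Int) : ∀ (i c : Int),
    pvNext (ys ++ [z]) i c
      = pvNext ys i (if z = 2 then i + ys.length + 1 else c)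
          ++ [if z = 2 then i + ys.length + 1 else c] := by
  induction ys with
  | nil => intro i c; simp [pvNext]
  | cons y ys ih =>
    intro i c
    simp only [List.cons_append, pvNext, ih (i + 1) c, List.length_cons]
    rw [pvHeadD_append_singleton]
    have hc : ((ys.length + 1 : Nat) : Int) = (ys.length : Int) + 1 := by push_cast; ring
    rw [hc]
    ring_nf

theorem pvA_loop (numbers : List Int) : ∀ (m : Nat), m ≤ numbers.length →
    ∀ (pre suf : List Int) (curr : Int), pre.length = m + 1 →
    ((PySem.List.pyRange ((m : Int) - 1) (-1) (-1)).foldl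
      (fun (st : List Int × Int) index =>
        let curr := if PySem.List.pyGetD numbers index 0 = 2 then index + 1 else st.2
        (st.1.set (index + 1).toNat curr, curr))
      (pre ++ suf, curr)).1
    = pre.take 1 ++ pvNext (numbers.take m) 0 curr ++ suf := by
  intro m
  induction m with
  | zero =>
    intro _ pre suf curr hpre
    rw [show ((0 : Nat) : Int) - 1 = -1 by norm_num,
        PySem.List.pyRange_neg_one_eq_nil (by norm_num)]
    simp [pvNext, List.take_of_length_le (le_of_eq hpre)]
  | succ m ih =>
    intro hm pre suf curr hpre
    have hmlt : m < numbers.length := by omega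
    rw [show ((m + 1 : Nat) : Int) - 1 = (m : Int) by push_cast; ring,
        PySem.List.pyRange_neg_one_cons (by omega), List.foldl_cons]
    set curr' : Int := if PySem.List.pyGetD numbers (m : Int) 0 = 2 then (m : Int) + 1 else curr
      with hcurr'
    have hset : ((pre ++ suf).set ((m : Int) + 1).toNat curr')
        = pre.take (m + 1) ++ ((curr' :: suf) : List Int) := by
      have h1 : ((m : Int) + 1).toNat = m + 1 := by omega
      rw [h1, List.set_append, if_pos (by omega)]
      rw [show pre.set (m + 1) curr' = pre.take (m + 1) ++ curr' :: pre.drop (m + 2) by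
            rw [List.set_eq_take_append_cons_drop]; simp [hpre]]
      rw [List.drop_eq_nil_of_le (by omega)]
      simp
    show (List.foldl
        (fun (st : List Int × Int) index =>
          let curr := if PySem.List.pyGetD numbers index 0 = 2 then index + 1 else st.2
          (st.1.set (index + 1).toNat curr, curr))
        ((pre ++ suf).set ((m : Int) + 1).toNat curr', curr')
        (PySem.List.pyRange ((m : Int) - 1) (-1) (-1))).1
      = pre.take 1 ++ pvNext (numbers.take (m + 1)) 0 curr ++ suf
    rw [hset]
    rw [ih (by omega) (pre.take (m + 1)) (curr' :: suf) curr' (by simp; omega)]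
    have htake : numbers.take (m + 1) = numbers.take m ++ [numbers[m]] := by
      rw [List.take_add_one]; simp [List.getElem?_eq_getElem hmlt]
    have hget : PySem.List.pyGetD numbers (m : Int) 0 = numbers[m] := by
      rw [PySem.List.pyGetD_natCast, List.getD_eq_getElem _ _ hmlt]
    have hd : (if numbers[m] = 2 then (0 : Int) + (numbers.take m).length + 1 else curr)
        = curr' := by
      rw [hcurr', hget, List.length_take_of_le (by omega)]
      split_ifs <;> simp
    rw [htake, pvNext_snoc, hd, List.take_take]
    simp

theorem pvSetRun (v : Int) : ∀ (cnt lo : Nat) (hi : Int) (front rest : List Int),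
    hi = ((lo + cnt : Nat) : Int) → front.length = lo + 1 → cnt ≤ rest.length →
    (PySem.List.pyRange (lo : Int) hi 1).foldl
      (fun a idx => a.set (idx + 1).toNat v) (front ++ rest)
    = front ++ (List.replicate cnt v ++ rest.drop cnt) := by
  intro cnt
  induction cnt with
  | zero =>
    intro lo hi front rest hhi _ _
    rw [PySem.List.pyRange_one_eq_nil (by omega)]
    simp
  | succ cnt ih =>
    intro lo hi front rest hhi hfront hcnt
    cases rest with
    | nil => simp at hcnt
    | cons r rest' =>
      rw [PySem.List.pyRange_one_cons (by omega), List.foldl_cons]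
      have hset : ((front ++ r :: rest').set ((lo : Int) + 1).toNat v)
          = (front ++ [v]) ++ rest' := by
        have h1 : ((lo : Int) + 1).toNat = lo + 1 := by omega
        rw [h1, ← hfront, List.set_append, if_neg (by omega)]
        simp
      rw [hset,
          show ((lo : Int) + 1) = ((lo + 1 : Nat) : Int) by push_cast; ring,
          ih (lo + 1) hi (front ++ [v]) rest' (by omega) (by simp [hfront]) (by simpa using hcnt)]
      simp [List.replicate_succ]

theorem pvB_loop (numbers : List Int) : ∀ (q p prev : Nat) (front : List Int),
    p + q = numbers.length → prev ≤ p → front.length = prev + 1 →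
    ((PySem.List.pyRange (p : Int) ((numbers.length : Int)) 1).foldl
      (fun (st : List Int × Int) pI =>
        if PySem.List.pyGetD numbers pI 0 = 2 then
          ((PySem.List.pyRange st.2 (pI + 1) 1).foldl
            (fun a idx => a.set (idx + 1).toNat (pI + 1)) st.1, pI + 1)
        else st)
      (front ++ List.replicate (numbers.length - prev) (-1), (prev : Int))).1
    = front ++ (List.replicate (p - prev) ((pvNext (numbers.drop p) (p : Int) (-1)).headD (-1))
        ++ pvNext (numbers.drop p) (p : Int) (-1)) := by
  intro q
  induction q with
  | zero =>
    intro p prev front hpq hprev hfront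
    have hp : p = numbers.length := by omega
    rw [PySem.List.pyRange_one_eq_nil (by omega), List.foldl_nil]
    subst hp
    simp [List.drop_length, pvNext]
  | succ q ih =>
    intro p prev front hpq hprev hfront
    have hplt : p < numbers.length := by omega
    rw [PySem.List.pyRange_one_cons (by exact_mod_cast hplt), List.foldl_cons]
    have hget : PySem.List.pyGetD numbers (p : Int) 0 = numbers[p] := by
      rw [PySem.List.pyGetD_natCast, List.getD_eq_getElem _ _ hplt]
    have hdrop : numbers.drop p = numbers[p] :: numbers.drop (p + 1) :=
      List.drop_eq_getElem_cons hplt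
    have hcast : ((p : Int) + 1) = ((p + 1 : Nat) : Int) := by push_cast; ring
    by_cases h2 : numbers[p] = 2
    · rw [if_pos (by rw [hget]; exact h2)]
      simp only []
      have hrun : (PySem.List.pyRange ((prev : Nat) : Int) ((p : Int) + 1) 1).foldl
            (fun a idx => a.set (idx + 1).toNat ((p : Int) + 1))
            (front ++ List.replicate (numbers.length - prev) (-1))
          = front ++ (List.replicate (p + 1 - prev) ((p : Int) + 1)
              ++ (List.replicate (numbers.length - prev) (-1 : Int)).drop (p + 1 - prev)) := by
        exact pvSetRun ((p : Int) + 1) (p + 1 - prev) prev ((p : Int) + 1) front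
          (List.replicate (numbers.length - prev) (-1)) (by push_cast; omega) hfront (by simp; omega)
      rw [hrun, List.drop_replicate,
          show numbers.length - prev - (p + 1 - prev) = numbers.length - (p + 1) by omega]
      have := ih (p + 1) (p + 1)
        (front ++ List.replicate (p + 1 - prev) ((p : Int) + 1))
        (by omega) (le_refl _) (by simp [hfront]; omega)
      rw [hcast, ← List.append_assoc] at *
      rw [this, hdrop]
      simp [pvNext, h2, List.replicate_succ', show p + 1 - prev = (p - prev) + 1 by omega]
    · rw [if_neg (by rw [hget]; exact h2)]
      rw [hcast, ih (p + 1) prev front (by omega) (by omega) hfront, hdrop]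
      simp only [pvNext, if_neg h2, ← hcast, List.headD_cons]
      rw [show p + 1 - prev = (p - prev) + 1 by omega, List.replicate_succ']
      simp

theorem pvA_model (numbers : List Int) :
    two_contracted numbers = -1 :: pvNext numbers 0 (-1) := by
  unfold two_contracted
  simp only []
  rw [show List.replicate (numbers.length + 1) (-1 : Int)
        = List.replicate (numbers.length + 1) (-1 : Int) ++ ([] : List Int) by simp]
  rw [pvA_loop numbers numbers.length (le_refl _) _ [] (-1) (by simp)]
  simp [List.replicate_succ, List.take_length]

theorem pvB_model (numbers : List Int) :
    two_contracted_alt numbers = -1 :: pvNext numbers 0 (-1) := by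
  unfold two_contracted_alt
  simp only []
  have h := pvB_loop numbers numbers.length 0 0 [(-1)] (by omega) (le_refl _) (by simp)
  simp only [Nat.cast_zero, Nat.sub_zero, Nat.sub_self, List.drop_zero, List.replicate_zero,
    List.nil_append] at h
  rw [show List.replicate (numbers.length + 1) (-1 : Int)
        = [(-1 : Int)] ++ List.replicate numbers.length (-1) by simp [List.replicate_succ]]
  rw [h]
  simp

-- ===== VERDICT (by name: the statement is the Claim_ definition above) =====
theorem two_contracted_spec : Claim_equal_two_contracted := by
  intro numbers _
  unfold Spec_two_contracted
  rw [pvA_model, pvB_model]
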